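-- pv_equiv track=rewrite | github.com/ThomasCrawford/AdventofCode | 2019/22.py | get_fn_backwards
-- ===== SOURCE A (Python) =====
-- def get_fn_backwards(data):
--     a = 1
--     b = 0
--     for line in data[::-1]:
--         if line[0] == "cut":
--             m = int(line[-1])
--             b += m
--         elif line[1] == "with":
--             m = int(line[-1])
--             m = pow(m,-1,N)
--             a *= m
--             b *= m
--         elif line[1] == "into":
--             a *= -1
--             b *= -1
--             b += N-1
--     return a%N,b%N
--
-- N = 119315717514047
-- ===== SOURCE B (Python) =====
-- N = 119315717514047
--
-- def get_fn_backwards(data):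
--     # Two-stage approach: first PARSE every line into a tagged op, then compose
--     # the forward linear map x -> A*x + B over the parsed ops, and invert it
--     # once at the end with a single pow.
--     ops = []
--     for line in data:
--         if line[0] == "cut":
--             ops.append(("cut", int(line[-1])))
--         elif line[1] == "with":
--             ops.append(("inc", int(line[-1])))
--         elif line[1] == "into":
--             ops.append(("rev", 0))
--         else:
--             ops.append(("nop", 0))
--     A, B = 1, 0
--     for kind, m in ops:
--         if kind == "cut":
--             B = B - m
--         elif kind == "inc":
--             A = A * m
--             B = B * m
--         elif kind == "rev":
--             A, B = -A, N - 1 - B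
--     Ainv = pow(A, -1, N)
--     return Ainv % N, (-Ainv * B) % N
-- ===== Notes on version B (the rewrite author's own statement) =====
-- stated objective: alternative
-- what changed: B is staged: it first parses every line into a tagged op list, then folds the forward linear map (A,B) over the ops with plain multiplications, and takes a single modular inverse pow(A,-1,N) at the end, instead of A's single reversed loop with inline parsing and a modular inverse per 'deal with increment' line.
import Mathlib
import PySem

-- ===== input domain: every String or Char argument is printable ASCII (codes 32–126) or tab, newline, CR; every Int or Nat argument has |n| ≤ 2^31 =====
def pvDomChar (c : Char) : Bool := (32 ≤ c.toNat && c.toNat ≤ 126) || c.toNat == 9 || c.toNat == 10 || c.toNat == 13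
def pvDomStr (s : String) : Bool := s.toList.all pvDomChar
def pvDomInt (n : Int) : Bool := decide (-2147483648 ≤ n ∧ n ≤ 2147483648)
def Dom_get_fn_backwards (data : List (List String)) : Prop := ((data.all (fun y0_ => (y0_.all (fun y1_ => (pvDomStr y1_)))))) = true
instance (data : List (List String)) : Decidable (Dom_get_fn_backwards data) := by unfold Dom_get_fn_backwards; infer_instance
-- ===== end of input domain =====

-- B is staged: it first parses every line into a tagged op list, then folds the forward
-- linear map (A,B) over the ops, and takes one modular inverse at the end, instead of A's
-- reversed loop with inline parsing and an inverse per 'deal with increment' line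
-- (objective: alternative decomposition).

-- ===== PORT A =====
def pvN : Int := 119315717514047

-- pow(m, -1, n) for n > 0: the unique representative in [0, n) of m⁻¹ mod n;
-- none = ValueError (m not invertible mod n). Hand-ported (PySem.Int.powMod has no
-- negative exponent); exact for n > 0 by pyInvMod?_spec below.
def pyInvMod? (m n : Int) : Option Int :=
  if Int.gcd m n = 1 then
    some (PySem.Int.mod (Nat.gcdA ((PySem.Int.mod m n).toNat) n.toNat) n)
  else none

-- one iteration of A's loop body; none = the Python raised in this iteration
def stepA (s : Option (Int × Int)) (line : List String) : Option (Int × Int) :=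
  match s with
  | none => none
  | some (a, b) =>
    match PySem.List.pyGet? line 0 with
    | none => none
    | some w0 =>
      if w0 = "cut" then
        match (PySem.List.pyGet? line (-1)).bind PySem.Int.ofStr? with
        | none => none
        | some m => some (a, b + m)
      else
        match PySem.List.pyGet? line 1 with
        | none => none
        | some w1 =>
          if w1 = "with" then
            match (PySem.List.pyGet? line (-1)).bind PySem.Int.ofStr? with
            | none => none
            | some m =>
              match pyInvMod? m pvN with
              | none => none
              | some mi => some (a * mi, b * mi)
          else if w1 = "into" then some (a * -1, b * -1 + (pvN - 1))
          else some (a, b)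

def get_fn_backwards (data : List (List String)) : Int × Int :=
  -- data[::-1]; slice? with step -1 never fails
  let rev := (PySem.List.slice? data none none (-1)).getD []
  match rev.foldl stepA (some (1, 0)) with
  | some (a, b) => (PySem.Int.mod a pvN, PySem.Int.mod b pvN)
  | none => (0, 0)   -- unreachable under Pre_: the Python raised

-- ===== PORT B =====
-- B stage 1: parse one line into a tagged op; none = the Python raised while parsing
inductive Op where
  | cut (m : Int)
  | inc (m : Int)
  | rev
  | nop
deriving DecidableEq, Repr

def parseOp (line : List String) : Option Op :=
  match PySem.List.pyGet? line 0 with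
  | none => none
  | some w0 =>
    if w0 = "cut" then
      ((PySem.List.pyGet? line (-1)).bind PySem.Int.ofStr?).map Op.cut
    else
      match PySem.List.pyGet? line 1 with
      | none => none
      | some w1 =>
        if w1 = "with" then ((PySem.List.pyGet? line (-1)).bind PySem.Int.ofStr?).map Op.inc
        else if w1 = "into" then some Op.rev
        else some Op.nop

-- the parse loop accumulating ops (python builds the list with append)
def parseAll : List (List String) → Option (List Op)
  | [] => some []
  | l :: t =>
    match parseOp l with
    | none => none
    | some op =>
      match parseAll t with
      | none => none
      | some ops => some (op :: ops)

-- B stage 2: the pure forward-composition step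
def stepF (s : Int × Int) (op : Op) : Int × Int :=
  match op with
  | .cut m => (s.1, s.2 - m)
  | .inc m => (s.1 * m, s.2 * m)
  | .rev => (-s.1, pvN - 1 - s.2)
  | .nop => s

def get_fn_backwards_alt (data : List (List String)) : Int × Int :=
  match parseAll data with
  | none => (0, 0)   -- unreachable under Pre_: the Python raised while parsing
  | some ops =>
    let s := ops.foldl stepF (1, 0)
    match pyInvMod? s.1 pvN with
    | none => (0, 0) -- unreachable under Pre_
    | some ainv => (PySem.Int.mod ainv pvN, PySem.Int.mod (-ainv * s.2) pvN)

-- ===== PRECONDITION & SPEC =====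
-- shape check for one instruction line: the indexings succeed, int() parses, and a
-- 'deal with increment m' line has m invertible mod N (gcd(m,N)=1)
def lineOK (line : List String) : Bool :=
  match PySem.List.pyGet? line 0 with
  | none => false
  | some w0 =>
    if w0 = "cut" then
      ((PySem.List.pyGet? line (-1)).bind PySem.Int.ofStr?).isSome
    else
      match PySem.List.pyGet? line 1 with
      | none => false
      | some w1 =>
        if w1 = "with" then
          match (PySem.List.pyGet? line (-1)).bind PySem.Int.ofStr? with
          | none => false
          | some m => Int.gcd m pvN == 1
        else true

-- Pre_ excludes exactly the inputs on which the Python A raises: a line whose needed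
-- token is missing (IndexError), whose last token is not an int (ValueError), or a
-- 'with' line whose increment is not invertible mod N (ValueError from pow).
def Pre_get_fn_backwards (data : List (List String)) : Prop :=
  ∀ line ∈ data, lineOK line = true
instance (data : List (List String)) : Decidable (Pre_get_fn_backwards data) := by
  unfold Pre_get_fn_backwards; infer_instance

def pvWitness_get_fn_backwards : List (List String) :=
  [["cut", "3"], ["deal", "with", "increment", "7"], ["deal", "into", "new", "stack"]]

def Spec_get_fn_backwards (data : List (List String)) (out : Int × Int) : Prop := out = get_fn_backwards_alt data
instance (data : List (List String)) (out : Int × Int) : Decidable (Spec_get_fn_backwards data out) := by unfold Spec_get_fn_backwards; infer_instance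

-- ===== CLAIM (what is proved, stated in full; the proofs are below) =====
def Claim_equal_get_fn_backwards : Prop := ∀ (data : List (List String)), Dom_get_fn_backwards data → Pre_get_fn_backwards data → Spec_get_fn_backwards data (get_fn_backwards data)

-- ===== LEMMAS AND PROOFS =====

lemma pvN_pos : (0:Int) < pvN := by norm_num [pvN]

lemma pymod_eq_emod (a b : Int) (h : 0 < b) : PySem.Int.mod a b = a % b := by
  rw [PySem.Int.mod, Int.fmod_eq_emod, if_pos (Or.inl h.le), add_zero]

lemma coprime_mul (x y : Int) (hx : Int.gcd x pvN = 1) (hy : Int.gcd y pvN = 1) :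
    Int.gcd (x * y) pvN = 1 := by
  have : Nat.Coprime (x.natAbs * y.natAbs) pvN.natAbs := Nat.Coprime.mul_left hx hy
  simpa [Int.gcd, Int.natAbs_mul] using this

lemma pyInvMod?_spec (m : Int) (h : Int.gcd m pvN = 1) :
    ∃ v, pyInvMod? m pvN = some v ∧ m * v ≡ 1 [ZMOD pvN] := by
  refine ⟨_, by rw [pyInvMod?, if_pos h], ?_⟩
  have hN := pvN_pos
  have hNne : pvN ≠ 0 := hN.ne'
  rw [pymod_eq_emod _ _ hN, pymod_eq_emod _ _ hN]
  set r : Int := m % pvN with hr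
  have hr0 : 0 ≤ r := Int.emod_nonneg m hNne
  have hcast : ((r.toNat : Int)) = r := Int.toNat_of_nonneg hr0
  have hNcast : ((pvN.toNat : Int)) = pvN := Int.toNat_of_nonneg hN.le
  have hgcd : Nat.gcd r.toNat pvN.toNat = 1 := by
    have h1 : Int.gcd r pvN = 1 := by rw [hr, Int.gcd_emod m pvN]; exact h
    have : r.natAbs = r.toNat := by omega
    have hpn : pvN.natAbs = pvN.toNat := by omega
    simpa [Int.gcd, this, hpn] using h1
  have key : (r.toNat : Int) * Nat.gcdA r.toNat pvN.toNat ≡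
      (Nat.gcd r.toNat pvN.toNat : Int) [ZMOD (pvN.toNat : Int)] :=
    Int.gcd_a_modEq r.toNat pvN.toNat
  rw [hgcd, hNcast, hcast] at key
  have hm_r : m ≡ r [ZMOD pvN] := (Int.emod_emod_of_dvd m dvd_rfl).symm
  have hg_mod : (Nat.gcdA r.toNat pvN.toNat % pvN) ≡ Nat.gcdA r.toNat pvN.toNat [ZMOD pvN] :=
    Int.emod_emod_of_dvd _ dvd_rfl
  calc m * (Nat.gcdA r.toNat pvN.toNat % pvN)
      ≡ r * Nat.gcdA r.toNat pvN.toNat [ZMOD pvN] := Int.ModEq.mul hm_r hg_mod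
    _ ≡ (1 : Int) [ZMOD pvN] := by simpa using key

lemma modeq_cancel (A x y : Int) (hg : Int.gcd A pvN = 1)
    (h : A * x ≡ A * y [ZMOD pvN]) : x ≡ y [ZMOD pvN] := by
  have h2 := Int.ModEq.cancel_left_div_gcd pvN_pos h
  rw [Int.gcd_comm, hg] at h2
  simpa using h2

-- each op acts as a linear map: stepF on any state is the op's own (α,β) composed with it
lemma stepF_lin (op : Op) (p q : Int) :
    stepF (p, q) op = ((stepF (1, 0) op).1 * p, (stepF (1, 0) op).1 * q + (stepF (1, 0) op).2) := by
  cases op <;> refine Prod.ext ?_ ?_ <;> simp [stepF] <;> ring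

lemma foldF_shift (ops : List Op) (p q : Int) :
    ops.foldl stepF (p, q) =
      ((ops.foldl stepF (1, 0)).1 * p,
       (ops.foldl stepF (1, 0)).1 * q + (ops.foldl stepF (1, 0)).2) := by
  induction ops generalizing p q with
  | nil => simp
  | cons op t ih =>
    rw [List.foldl_cons, List.foldl_cons, stepF_lin op p q]
    rw [ih, ih ((stepF (1, 0) op).1) ((stepF (1, 0) op).2)]
    simp [Prod.ext_iff]; constructor <;> ring

-- the loop invariant: B's composed forward map is the inverse (mod N) of A's backward map
lemma fold_inv (data : List (List String)) (h : ∀ l ∈ data, lineOK l = true) :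
    ∃ a b ops, data.foldr (fun l s => stepA s l) (some ((1:Int), (0:Int))) = some (a, b) ∧
      parseAll data = some ops ∧
      Int.gcd (ops.foldl stepF (1, 0)).1 pvN = 1 ∧
      (ops.foldl stepF (1, 0)).1 * a ≡ 1 [ZMOD pvN] ∧
      (ops.foldl stepF (1, 0)).1 * b + (ops.foldl stepF (1, 0)).2 ≡ 0 [ZMOD pvN] := by
  induction data with
  | nil =>
    exact ⟨1, 0, [], rfl, rfl, Int.one_gcd, by simp [Int.ModEq.refl], by simp [Int.ModEq.refl]⟩
  | cons l t ih =>
    have hl : lineOK l = true := h l (by simp)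
    obtain ⟨a', b', ops', hfa, hps, hg, h1, h2⟩ := ih (fun x hx => h x (by simp [hx]))
    rw [List.foldr_cons, hfa]
    cases h0 : PySem.List.pyGet? l 0 with
    | none => simp [lineOK, h0] at hl
    | some w0 =>
      by_cases hw0 : w0 = "cut"
      · cases hm : (PySem.List.pyGet? l (-1)).bind PySem.Int.ofStr? with
        | none => simp [lineOK, h0, hw0, hm] at hl
        | some m =>
          refine ⟨a', b' + m, Op.cut m :: ops', by simp [stepA, h0, hw0, hm], ?_, ?_, ?_, ?_⟩
          · simp [parseAll, parseOp, h0, hw0, hm, hps]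
          all_goals
            rw [List.foldl_cons,
              show stepF ((1:Int), (0:Int)) (Op.cut m) = (1, 0 - m) from rfl,
              foldF_shift ops' 1 (0 - m)]
          · simpa using hg
          · simpa using h1
          · have e : (ops'.foldl stepF (1, 0)).1 * 1 * (b' + m) +
                ((ops'.foldl stepF (1, 0)).1 * (0 - m) + (ops'.foldl stepF (1, 0)).2) =
                (ops'.foldl stepF (1, 0)).1 * b' + (ops'.foldl stepF (1, 0)).2 := by ring
            rw [e]; exact h2
      · cases h1' : PySem.List.pyGet? l 1 with
        | none => simp [lineOK, h0, hw0, h1'] at hl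
        | some w1 =>
          by_cases hw1 : w1 = "with"
          · cases hm : (PySem.List.pyGet? l (-1)).bind PySem.Int.ofStr? with
            | none => simp [lineOK, h0, hw0, h1', hw1, hm] at hl
            | some m =>
              have hgm : Int.gcd m pvN = 1 := by
                simpa [lineOK, h0, hw0, h1', hw1, hm] using hl
              obtain ⟨v, hv, hmv⟩ := pyInvMod?_spec m hgm
              refine ⟨a' * v, b' * v, Op.inc m :: ops',
                by simp [stepA, h0, hw0, h1', hw1, hm, hv], ?_, ?_, ?_, ?_⟩
              · simp [parseAll, parseOp, h0, hw0, h1', hw1, hm, hps]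
              all_goals
                rw [List.foldl_cons,
                  show stepF ((1:Int), (0:Int)) (Op.inc m) = (1 * m, 0 * m) from rfl,
                  foldF_shift ops' (1 * m) (0 * m)]
              · simpa using coprime_mul _ m hg hgm
              · have e : (ops'.foldl stepF (1, 0)).1 * (1 * m) * (a' * v) =
                    ((ops'.foldl stepF (1, 0)).1 * a') * (m * v) := by ring
                rw [e]
                calc ((ops'.foldl stepF (1, 0)).1 * a') * (m * v)
                    ≡ 1 * 1 [ZMOD pvN] := Int.ModEq.mul h1 hmv
                  _ = 1 := by ring
              · have e : (ops'.foldl stepF (1, 0)).1 * (1 * m) * (b' * v) +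
                    ((ops'.foldl stepF (1, 0)).1 * (0 * m) + (ops'.foldl stepF (1, 0)).2) =
                    ((ops'.foldl stepF (1, 0)).1 * b') * (m * v) + (ops'.foldl stepF (1, 0)).2 := by
                  ring
                rw [e]
                calc ((ops'.foldl stepF (1, 0)).1 * b') * (m * v) + (ops'.foldl stepF (1, 0)).2
                    ≡ ((ops'.foldl stepF (1, 0)).1 * b') * 1 + (ops'.foldl stepF (1, 0)).2
                      [ZMOD pvN] :=
                      Int.ModEq.add (Int.ModEq.mul (Int.ModEq.refl _) hmv) (Int.ModEq.refl _)
                  _ = (ops'.foldl stepF (1, 0)).1 * b' + (ops'.foldl stepF (1, 0)).2 := by ring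
                  _ ≡ 0 [ZMOD pvN] := h2
          · by_cases hw1' : w1 = "into"
            · refine ⟨a' * -1, b' * -1 + (pvN - 1), Op.rev :: ops',
                by simp [stepA, h0, hw0, h1', hw1'], ?_, ?_, ?_, ?_⟩
              · simp [parseAll, parseOp, h0, hw0, h1', hw1', hps]
              all_goals
                rw [List.foldl_cons,
                  show stepF ((1:Int), (0:Int)) Op.rev = (-1, pvN - 1 - 0) from rfl,
                  foldF_shift ops' (-1) (pvN - 1 - 0)]
              · simpa [Int.gcd, Int.natAbs_mul] using hg
              · have e : (ops'.foldl stepF (1, 0)).1 * -1 * (a' * -1) =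
                    (ops'.foldl stepF (1, 0)).1 * a' := by ring
                rw [e]; exact h1
              · have e : (ops'.foldl stepF (1, 0)).1 * -1 * (b' * -1 + (pvN - 1)) +
                    ((ops'.foldl stepF (1, 0)).1 * (pvN - 1 - 0) + (ops'.foldl stepF (1, 0)).2) =
                    (ops'.foldl stepF (1, 0)).1 * b' + (ops'.foldl stepF (1, 0)).2 := by ring
                rw [e]; exact h2
            · refine ⟨a', b', Op.nop :: ops',
                by simp [stepA, h0, hw0, h1', hw1, hw1'], ?_, ?_, ?_, ?_⟩
              · simp [parseAll, parseOp, h0, hw0, h1', hw1, hw1', hps]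
              all_goals
                rw [List.foldl_cons, show stepF ((1:Int), (0:Int)) Op.nop = (1, 0) from rfl]
              · exact hg
              · exact h1
              · exact h2

-- ===== VERDICT (by name: the statement is the Claim_ definition above) =====
theorem get_fn_backwards_spec : Claim_equal_get_fn_backwards := by
  intro data _hdom hpre
  obtain ⟨a, b, ops, hfa, hps, hg, h1, h2⟩ := fold_inv data hpre
  obtain ⟨v, hv, hmv⟩ := pyInvMod?_spec _ hg
  show get_fn_backwards data = get_fn_backwards_alt data
  rw [get_fn_backwards, get_fn_backwards_alt]
  rw [PySem.List.slice?_none_none_neg_one]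
  simp only [Option.getD_some]
  rw [List.foldl_reverse]
  have hfa' : data.foldr (fun l s => stepA s l) (some ((1:Int), (0:Int))) = some (a, b) := hfa
  rw [hfa', hps]
  simp only [hv]
  set A := (ops.foldl stepF ((1:Int), (0:Int))).1 with hA
  set B := (ops.foldl stepF ((1:Int), (0:Int))).2 with hB
  have hav : a ≡ v [ZMOD pvN] := by
    apply modeq_cancel A a v hg
    calc A * a ≡ 1 [ZMOD pvN] := h1
      _ ≡ A * v [ZMOD pvN] := hmv.symm
  have hbv : b ≡ -v * B [ZMOD pvN] := by
    apply modeq_cancel A b (-v * B) hg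
    have hAb : A * b ≡ -B [ZMOD pvN] := by
      have := Int.ModEq.sub h2 (Int.ModEq.refl B)
      have e : A * b + B - B = A * b := by ring
      have e2 : (0:Int) - B = -B := by ring
      rwa [e, e2] at this
    calc A * b ≡ -B [ZMOD pvN] := hAb
      _ = -(1) * B := by ring
      _ ≡ -(A * v) * B [ZMOD pvN] := by
          exact Int.ModEq.mul (Int.ModEq.neg hmv.symm) (Int.ModEq.refl B)
      _ = A * (-v * B) := by ring
  rw [pymod_eq_emod a pvN pvN_pos, pymod_eq_emod b pvN pvN_pos,
    pymod_eq_emod v pvN pvN_pos, pymod_eq_emod (-v * B) pvN pvN_pos]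
  exact Prod.ext hav hbv
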